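-- pv_equiv track=rewrite | github.com/wems99/Exam-DE--semantic-analyzer | analizadorSemantico.py | _analizador_elementos
-- ===== SOURCE A (Python) =====
-- def _analizador_elementos(tokens):
--     operador_asignacion = False
--     condicional = False
--     parentesis_abre = False
--     parentesis_cierra = False
--     palabra_tipo = False
--
--     for token in tokens:
--         if token[1] == 'tipo':
--             palabra_tipo = True
--         if token[1] == 'asignacion':
--             operador_asignacion = True
--         if token[1] == 'parentesis':
--             if token[0] == '(':
--                 parentesis_abre = True
--             else:
--                 parentesis_cierra = True
--         if token[1] == 'condicicional':
--             condicional = True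
--
--     if condicional and parentesis_abre:
--         return 'CONDICIONAL'
--     elif operador_asignacion and parentesis_abre:
--         return 'ASIGNACION_FUNCION'
--     elif operador_asignacion and not palabra_tipo:
--         return 'ASIGNACION'
--     else:
--         return 'NONE'
-- ===== SOURCE B (Python) =====
-- # Table-driven rule engine: normalize each token to a "kind" key, collect the
-- # set of kinds present, then return the label of the first rule whose required
-- # kinds are all present and whose forbidden kinds are all absent.
-- _RULES = [
--     ([('condicicional', None), ('parentesis', '(')], [], 'CONDICIONAL'),
--     ([('asignacion', None), ('parentesis', '(')], [], 'ASIGNACION_FUNCION'),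
--     ([('asignacion', None)], [('tipo', None)], 'ASIGNACION'),
--     ([], [], 'NONE'),
-- ]
--
-- def _kind(token):
--     return (token[1], token[0]) if token[1] == 'parentesis' else (token[1], None)
--
-- def _analizador_elementos(tokens):
--     kinds = {_kind(t) for t in tokens}
--     for required, forbidden, label in _RULES:
--         if all(k in kinds for k in required) and not any(k in kinds for k in forbidden):
--             return label
-- ===== Notes on version B (the rewrite author's own statement) =====
-- stated objective: alternative
-- what changed: The fused five-flag loop with a hardcoded if/elif cascade is replaced by a table-driven rule engine: each token is normalized to a kind key, the set of kinds present is built once, and a declarative rules table (required kinds, forbidden kinds, label) is scanned for the first matching rule.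
import Mathlib
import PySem

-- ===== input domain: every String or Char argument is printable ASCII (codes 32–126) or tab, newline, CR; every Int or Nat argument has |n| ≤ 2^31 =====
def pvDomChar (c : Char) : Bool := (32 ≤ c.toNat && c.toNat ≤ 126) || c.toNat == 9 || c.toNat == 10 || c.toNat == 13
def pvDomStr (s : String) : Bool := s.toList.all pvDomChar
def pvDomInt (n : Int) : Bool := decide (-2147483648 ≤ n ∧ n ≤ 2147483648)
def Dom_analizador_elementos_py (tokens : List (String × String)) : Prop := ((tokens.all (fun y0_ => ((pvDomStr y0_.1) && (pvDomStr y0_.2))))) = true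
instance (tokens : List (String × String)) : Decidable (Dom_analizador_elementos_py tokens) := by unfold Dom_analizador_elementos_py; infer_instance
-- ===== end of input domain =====

-- B replaces the fused five-flag loop + hardcoded cascade with a table-driven
-- rule engine over a set of normalized token kinds; objective: alternative.
-- ===== PORT A =====
def analizador_elementos_py_loop (st : Bool × Bool × Bool × Bool × Bool)
    (tokens : List (String × String)) : Bool × Bool × Bool × Bool × Bool :=
  tokens.foldl (fun st token =>
    let (oa, cond, pa, pc, pt) := st
    let pt := if token.2 == "tipo" then true else pt
    let oa := if token.2 == "asignacion" then true else oa
    let (pa, pc) := if token.2 == "parentesis" then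
        (if token.1 == "(" then (true, pc) else (pa, true))
      else (pa, pc)
    let cond := if token.2 == "condicicional" then true else cond
    (oa, cond, pa, pc, pt)) st

def analizador_elementos_py (tokens : List (String × String)) : String :=
  let (oa, cond, pa, _pc, pt) :=
    analizador_elementos_py_loop (false, false, false, false, false) tokens
  if cond && pa then "CONDICIONAL"
  else if oa && pa then "ASIGNACION_FUNCION"
  else if oa && !pt then "ASIGNACION"
  else "NONE"

-- ===== PORT B =====
-- _kind(token): normalize a token to its kind key
def pvKind (t : String × String) : String × Option String :=
  if t.2 == "parentesis" then (t.2, some t.1) else (t.2, none)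

-- _RULES table: (required kinds, forbidden kinds, label)
def pvRules : List (List (String × Option String) × List (String × Option String) × String) :=
  [([("condicicional", none), ("parentesis", some "(")], [], "CONDICIONAL"),
   ([("asignacion", none), ("parentesis", some "(")], [], "ASIGNACION_FUNCION"),
   ([("asignacion", none)], [("tipo", none)], "ASIGNACION"),
   ([], [], "NONE")]

-- the 'for required, forbidden, label in _RULES' loop; the [] case is
-- unreachable in Python (the last rule always matches)
def pvApplyRules (kinds : PySem.Set (String × Option String)) :
    List (List (String × Option String) × List (String × Option String) × String) → String
  | [] => "NONE"
  | (required, forbidden, label) :: rest =>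
      if required.all (fun k => PySem.Set.contains kinds k) &&
         !(forbidden.any (fun k => PySem.Set.contains kinds k)) then label
      else pvApplyRules kinds rest

def analizador_elementos_py_alt (tokens : List (String × String)) : String :=
  pvApplyRules (PySem.Set.ofList (tokens.map pvKind)) pvRules

-- ===== PRECONDITION & SPEC =====
def Spec_analizador_elementos_py (tokens : List (String × String)) (out : String) : Prop := out = analizador_elementos_py_alt tokens
instance (tokens : List (String × String)) (out : String) : Decidable (Spec_analizador_elementos_py tokens out) := by unfold Spec_analizador_elementos_py; infer_instance

-- ===== CLAIM (what is proved, stated in full; the proofs are below) =====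
def Claim_equal_analizador_elementos_py : Prop := ∀ (tokens : List (String × String)), Dom_analizador_elementos_py tokens → Spec_analizador_elementos_py tokens (analizador_elementos_py tokens)

-- ===== LEMMAS AND PROOFS =====
theorem analizador_loop_eq (tokens : List (String × String))
    (oa cond pa pc pt : Bool) :
    analizador_elementos_py_loop (oa, cond, pa, pc, pt) tokens =
      (oa || tokens.any (fun t => t.2 == "asignacion"),
       cond || tokens.any (fun t => t.2 == "condicicional"),
       pa || tokens.any (fun t => t.2 == "parentesis" && t.1 == "("),
       pc || tokens.any (fun t => t.2 == "parentesis" && !(t.1 == "(")),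
       pt || tokens.any (fun t => t.2 == "tipo")) := by
  induction tokens generalizing oa cond pa pc pt with
  | nil => simp [analizador_elementos_py_loop]
  | cons h t ih =>
    simp only [analizador_elementos_py_loop, List.foldl_cons] at *
    rw [ih]
    by_cases h1 : h.2 == "tipo" <;> by_cases h2 : h.2 == "asignacion" <;>
      by_cases h3 : h.2 == "parentesis" <;> by_cases h4 : h.1 == "(" <;>
      by_cases h5 : h.2 == "condicicional" <;>
      simp [h1, h2, h3, h4, h5]

theorem kinds_contains (tokens : List (String × String)) (k : String × Option String) :
    PySem.Set.contains (PySem.Set.ofList (tokens.map pvKind)) k =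
      tokens.any (fun t => pvKind t == k) := by
  rw [Bool.eq_iff_iff]
  simp [PySem.Set.mem_ofList, List.any_eq_true, List.mem_map]

theorem kind_eq_paren (t : String × String) :
    (pvKind t == ("parentesis", some "(")) = (t.2 == "parentesis" && t.1 == "(") := by
  unfold pvKind
  by_cases h : t.2 = "parentesis" <;>
    [skip; rw [if_neg (by simpa using h)]] <;> rw [Bool.eq_iff_iff] <;> simp [h]

theorem kind_eq_plain (t : String × String) (s : String) (hs : s ≠ "parentesis") :
    (pvKind t == (s, (none : Option String))) = (t.2 == s) := by
  unfold pvKind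
  by_cases h : t.2 = "parentesis" <;>
    [skip; rw [if_neg (by simpa using h)]] <;> rw [Bool.eq_iff_iff] <;>
    simp [h, Ne.symm hs]

-- ===== VERDICT (by name: the statement is the Claim_ definition above) =====
theorem analizador_elementos_py_spec : Claim_equal_analizador_elementos_py := by
  intro tokens _
  unfold Spec_analizador_elementos_py analizador_elementos_py analizador_elementos_py_alt pvRules
  rw [analizador_loop_eq]
  simp only [pvApplyRules, List.all_cons, List.all_nil, List.any_cons, List.any_nil,
    kinds_contains, Bool.false_or, Bool.or_false, Bool.and_true, Bool.not_false]
  simp only [funext kind_eq_paren,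
    funext (fun t => kind_eq_plain t "condicicional" (by decide)),
    funext (fun t => kind_eq_plain t "asignacion" (by decide)),
    funext (fun t => kind_eq_plain t "tipo" (by decide))]
  by_cases h1 : tokens.any (fun t => t.2 == "condicicional") <;>
    by_cases h2 : tokens.any (fun t => t.2 == "parentesis" && t.1 == "(") <;>
    by_cases h3 : tokens.any (fun t => t.2 == "asignacion") <;>
    by_cases h4 : tokens.any (fun t => t.2 == "tipo") <;>
    simp [h1, h2, h3, h4]
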